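-- pv_equiv track=rewrite | github.com/marss-7/Pacman-sl | ml/feature_cleaning.py | calculate_food_features
-- ===== SOURCE A (Python) =====
-- def calculate_food_features(row, pacman_x, pacman_y):
--     food_grid = row["food_grid"]
--     food_count = 0
--     min_food_dist = None
--
--     for x in range(len(food_grid)):
--         for y in range(len(food_grid[x])):
--             if food_grid[x][y] == 1:
--                 food_count += 1
--                 dist = abs(pacman_x - x) + abs(pacman_y - y)
--                 if min_food_dist is None or dist < min_food_dist:
--                     min_food_dist = dist
--
--     if min_food_dist is None:
--         min_food_dist = None
--
--     return food_count, min_food_dist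
-- ===== SOURCE B (Python) =====
-- def calculate_food_features(row, pacman_x, pacman_y):
--     food_grid = row["food_grid"]
--
--     def row_summary(x, cols):
--         # per-row summary: count of food, and nearest distance with the
--         # constant row offset |pacman_x - x| factored out of the inner min
--         n = cols.count(1)
--         if n == 0:
--             return 0, None
--         nearest = min(abs(pacman_y - y) for y, v in enumerate(cols) if v == 1)
--         return n, abs(pacman_x - x) + nearest
--
--     def merge(a, b):
--         ca, ma = a
--         cb, mb = b
--         if ma is None:
--             m = mb
--         elif mb is None:
--             m = ma
--         else:
--             m = min(ma, mb)
--         return ca + cb, m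
--
--     def go(x, rows):
--         if not rows:
--             return 0, None
--         return merge(row_summary(x, rows[0]), go(x + 1, rows[1:]))
--
--     return go(0, food_grid)
-- ===== Notes on version B (the rewrite author's own statement) =====
-- stated objective: alternative
-- what changed: Replaced the fused double index-loop with a running (count, min) accumulator by a structural recursion over rows that builds an independent per-row summary (food count via cols.count(1), nearest distance with the constant |pacman_x - x| row offset factored out of the inner min over |pacman_y - y|) and combines summaries with a monoid-style merge.
import Mathlib
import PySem

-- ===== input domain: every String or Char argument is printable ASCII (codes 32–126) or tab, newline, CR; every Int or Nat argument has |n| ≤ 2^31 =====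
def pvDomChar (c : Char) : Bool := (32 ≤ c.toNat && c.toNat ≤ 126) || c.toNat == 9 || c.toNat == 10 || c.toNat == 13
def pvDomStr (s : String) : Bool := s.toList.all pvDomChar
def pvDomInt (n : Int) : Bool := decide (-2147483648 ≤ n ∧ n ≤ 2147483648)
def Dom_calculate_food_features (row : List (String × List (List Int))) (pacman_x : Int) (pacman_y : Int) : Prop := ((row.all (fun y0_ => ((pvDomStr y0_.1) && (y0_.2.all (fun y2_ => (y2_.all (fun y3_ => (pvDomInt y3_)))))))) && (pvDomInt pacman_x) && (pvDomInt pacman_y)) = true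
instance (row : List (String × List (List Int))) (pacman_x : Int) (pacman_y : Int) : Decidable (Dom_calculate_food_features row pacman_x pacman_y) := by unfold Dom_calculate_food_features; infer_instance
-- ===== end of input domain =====

-- B replaces A's fused double index-loop (running count and running minimum) by a structural
-- recursion over rows building independent per-row summaries (count of 1s, nearest distance with
-- the row offset |pacman_x - x| factored out of the inner min) combined by a monoid-style merge.


-- ===== PORT A =====
def calculate_food_features (row : List (String × List (List Int))) (pacman_x : Int) (pacman_y : Int) : Int × Option Int :=
  let food_grid := ((PySem.Dict.mk row).get? "food_grid").getD []   -- row["food_grid"]; KeyError excluded by Pre_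
  let st :=
    (PySem.List.pyRange 0 (PySem.List.len food_grid) 1).foldl (fun st x =>
      let cols := PySem.List.pyGetD food_grid x []
      (PySem.List.pyRange 0 (PySem.List.len cols) 1).foldl (fun st y =>
        if PySem.List.pyGetD cols y 0 = 1 then
          let dist := |pacman_x - x| + |pacman_y - y|
          match st.2 with
          | none => (st.1 + 1, some dist)
          | some m => (st.1 + 1, if dist < m then some dist else some m)
        else st) st) ((0 : Int), (none : Option Int))
  (st.1, st.2)

-- ===== PORT B =====
-- row summary: count of food cells, nearest distance with the row offset factored out of the min
def cff_row_summary (px py x : Int) (cols : List Int) : Int × Option Int :=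
  let n : Int := (PySem.List.count cols 1 : Int)
  if n = 0 then (0, none)
  else
    match PySem.List.min? (((PySem.List.enumerate cols 0).filter (fun q => q.2 == 1)).map
        (fun q => |py - q.1|)) (fun d => d) with
    | some nearest => (n, some (|px - x| + nearest))
    | none => (n, none)   -- unreachable: n ≠ 0 means at least one food cell

def cff_merge (a b : Int × Option Int) : Int × Option Int :=
  let m := match a.2, b.2 with
    | none, mb => mb
    | some ma, none => some ma
    | some ma, some mb => some (min ma mb)
  (a.1 + b.1, m)

def cff_go (px py : Int) (x : Int) : List (List Int) → Int × Option Int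
  | [] => (0, none)
  | cols :: rest => cff_merge (cff_row_summary px py x cols) (cff_go px py (x + 1) rest)

def calculate_food_features_alt (row : List (String × List (List Int))) (pacman_x : Int) (pacman_y : Int) : Int × Option Int :=
  let food_grid := ((PySem.Dict.mk row).get? "food_grid").getD []
  cff_go pacman_x pacman_y 0 food_grid

-- ===== PRECONDITION & SPEC =====
-- Pre_ excludes only rows with no "food_grid" key, on which Python A raises KeyError.
def Pre_calculate_food_features (row : List (String × List (List Int))) (pacman_x : Int) (pacman_y : Int) : Prop :=
  ((PySem.Dict.mk row).get? "food_grid").isSome = true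
instance (row : List (String × List (List Int))) (pacman_x : Int) (pacman_y : Int) : Decidable (Pre_calculate_food_features row pacman_x pacman_y) := by unfold Pre_calculate_food_features; infer_instance
def pvWitness_calculate_food_features : (List (String × List (List Int))) × Int × Int :=
  ([("food_grid", [[1, 0], [0, 1]])], 0, 0)

def Spec_calculate_food_features (row : List (String × List (List Int))) (pacman_x : Int) (pacman_y : Int) (out : Int × Option Int) : Prop := out = calculate_food_features_alt row pacman_x pacman_y
instance (row : List (String × List (List Int))) (pacman_x : Int) (pacman_y : Int) (out : Int × Option Int) : Decidable (Spec_calculate_food_features row pacman_x pacman_y out) := by unfold Spec_calculate_food_features; infer_instance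

-- ===== CLAIM (what is proved, stated in full; the proofs are below) =====
def Claim_equal_calculate_food_features : Prop := ∀ (row : List (String × List (List Int))) (pacman_x : Int) (pacman_y : Int), Dom_calculate_food_features row pacman_x pacman_y → Pre_calculate_food_features row pacman_x pacman_y → Spec_calculate_food_features row pacman_x pacman_y (calculate_food_features row pacman_x pacman_y)

-- ===== LEMMAS AND PROOFS =====

-- A's per-cell state update, abstracted over the cell coordinate.
def pvStep (px py : Int) (st : Int × Option Int) (c : Int × Int) : Int × Option Int :=
  let dist := |px - c.1| + |py - c.2|
  match st.2 with
  | none => (st.1 + 1, some dist)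
  | some m => (st.1 + 1, if dist < m then some dist else some m)

-- A's running-minimum update on the option state.
def pvMMin (m : Option Int) (d : Int) : Option Int :=
  match m with
  | none => some d
  | some m => if d < m then some d else some m

def pvCellsRow (x : Int) (cols : List Int) (s : Int) : List (Int × Int) :=
  ((PySem.List.enumerate cols s).filter (fun q => q.2 == 1)).map (fun q => (x, q.1))

-- inner loop = fold of pvStep over the food cells of one row
lemma pv_inner (px py x : Int) : ∀ (cols : List Int) (s : Int) (st : Int × Option Int),
    (PySem.List.enumerate cols s).foldl
      (fun st q => if q.2 = 1 then pvStep px py st (x, q.1) else st) st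
      = (pvCellsRow x cols s).foldl (pvStep px py) st := by
  intro cols
  induction cols with
  | nil => intro s st; simp [pvCellsRow, PySem.List.enumerate]
  | cons v t ih =>
      intro s st
      simp only [PySem.List.enumerate_cons, List.foldl_cons, pvCellsRow, List.filter_cons]
      by_cases hv : v = 1 <;>
        simp [hv, pvCellsRow] at ih ⊢ <;> rw [ih]

-- the pyRange-indexed inner loop is the fold over enumerate
lemma pv_inner_range (px py x : Int) (cols : List Int) (st : Int × Option Int) :
    (PySem.List.pyRange 0 (PySem.List.len cols) 1).foldl
      (fun st y => if PySem.List.pyGetD cols y 0 = 1 then pvStep px py st (x, y) else st) st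
      = (PySem.List.enumerate cols 0).foldl
          (fun st q => if q.2 = 1 then pvStep px py st (x, q.1) else st) st := by
  rw [PySem.List.enumerate_eq_map_pyRange cols 0, List.foldl_map]

def pvCells (fg : List (List Int)) (s : Int) : List (Int × Int) :=
  (PySem.List.enumerate fg s).flatMap (fun p =>
    ((PySem.List.enumerate p.2 0).filter (fun q => q.2 == 1)).map (fun q => (p.1, q.1)))

-- whole double loop = fold of pvStep over all food cells
lemma pv_outer (px py : Int) : ∀ (fg : List (List Int)) (s : Int) (st : Int × Option Int),
    (PySem.List.enumerate fg s).foldl (fun st p =>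
        (PySem.List.pyRange 0 (PySem.List.len p.2) 1).foldl
          (fun st y => if PySem.List.pyGetD p.2 y 0 = 1 then pvStep px py st (p.1, y) else st) st) st
      = (pvCells fg s).foldl (pvStep px py) st := by
  intro fg
  induction fg with
  | nil => intro s st; simp [pvCells, PySem.List.enumerate]
  | cons cols t ih =>
      intro s st
      simp only [PySem.List.enumerate_cons, List.foldl_cons, pvCells, List.flatMap_cons,
        List.foldl_append]
      rw [pv_inner_range, pv_inner]
      simp only [pvCellsRow]
      rw [ih]
      rfl

-- the outer pyRange loop is the fold over enumerate fg
lemma pv_outer_range (px py : Int) (fg : List (List Int)) (st : Int × Option Int) :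
    (PySem.List.pyRange 0 (PySem.List.len fg) 1).foldl (fun st x =>
        let cols := PySem.List.pyGetD fg x []
        (PySem.List.pyRange 0 (PySem.List.len cols) 1).foldl
          (fun st y => if PySem.List.pyGetD cols y 0 = 1 then pvStep px py st (x, y) else st) st) st
      = (PySem.List.enumerate fg 0).foldl (fun st p =>
          (PySem.List.pyRange 0 (PySem.List.len p.2) 1).foldl
            (fun st y => if PySem.List.pyGetD p.2 y 0 = 1 then pvStep px py st (p.1, y) else st) st) st := by
  rw [PySem.List.enumerate_eq_map_pyRange fg [], List.foldl_map]

-- the fused fold splits into count and running minimum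
lemma pv_split (px py : Int) : ∀ (l : List (Int × Int)) (c : Int) (m : Option Int),
    l.foldl (pvStep px py) (c, m)
      = (c + (l.length : Int), (l.map (fun cxy => |px - cxy.1| + |py - cxy.2|)).foldl pvMMin m) := by
  intro l
  induction l with
  | nil => intro c m; simp
  | cons a t ih =>
      intro c m
      simp only [List.foldl_cons, List.map_cons]
      have : pvStep px py (c, m) a = (c + 1, pvMMin m (|px - a.1| + |py - a.2|)) := by
        cases m <;> rfl
      rw [this, ih]
      congr 1
      simp only [List.length_cons]
      push_cast
      ring

lemma pv_mmin_some : ∀ (t : List Int) (a : Int),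
    t.foldl pvMMin (some a) = some (t.foldl min a) := by
  intro t
  induction t with
  | nil => intro a; rfl
  | cons d t ih =>
      intro a
      simp only [List.foldl_cons]
      have : pvMMin (some a) d = some (min a d) := by
        simp only [pvMMin, min_def]
        split_ifs <;> first | rfl | omega
      rw [this, ih]

-- B's option-min merge
def pvOMin (a b : Option Int) : Option Int :=
  match a, b with
  | none, mb => mb
  | some ma, none => some ma
  | some ma, some mb => some (min ma mb)

-- the denotation both sides reduce to: count and running min over a cell list
def pvG (px py : Int) (cells : List (Int × Int)) : Int × Option Int :=
  ((cells.length : Int), (cells.map (fun cxy => |px - cxy.1| + |py - cxy.2|)).foldl pvMMin none)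

lemma pv_foldl_min_assoc (a : Int) : ∀ (t : List Int) (b : Int),
    t.foldl min (min a b) = min a (t.foldl min b) := by
  intro t
  induction t with
  | nil => intro b; rfl
  | cons d t ih =>
      intro b
      simp only [List.foldl_cons]
      rw [min_assoc]
      exact ih (min b d)

lemma pv_mmin_omin : ∀ (l : List Int) (m : Option Int),
    l.foldl pvMMin m = pvOMin m (l.foldl pvMMin none) := by
  intro l m
  cases m with
  | none => cases l <;> rfl
  | some a =>
      cases l with
      | nil => rfl
      | cons b t =>
          simp only [List.foldl_cons]
          rw [show pvMMin (some a) b = some (min a b) from by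
                simp only [pvMMin, min_def]; split_ifs <;> first | rfl | omega,
              show pvMMin none b = some b from rfl,
              pv_mmin_some, pv_mmin_some, pv_foldl_min_assoc]
          rfl

lemma pv_g_append (px py : Int) (l r : List (Int × Int)) :
    pvG px py (l ++ r) = cff_merge (pvG px py l) (pvG px py r) := by
  simp only [pvG, cff_merge, List.map_append, List.foldl_append, List.length_append]
  rw [pv_mmin_omin]
  refine Prod.ext ?_ rfl
  push_cast
  ring

lemma pv_filter_len : ∀ (cols : List Int) (s : Int),
    ((PySem.List.enumerate cols s).filter (fun q => q.2 == 1)).length = cols.count 1 := by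
  intro cols
  induction cols with
  | nil => intro s; rfl
  | cons v t ih =>
      intro s
      simp only [PySem.List.enumerate_cons, List.filter_cons, List.count_cons]
      by_cases hv : v = 1 <;> simp [hv, ih]

lemma pv_min_add (c : Int) : ∀ (t : List Int) (d : Int),
    (t.map (fun e => c + e)).foldl min (c + d) = c + t.foldl min d := by
  intro t
  induction t with
  | nil => intro d; rfl
  | cons e t ih =>
      intro d
      simp only [List.map_cons, List.foldl_cons]
      rw [min_add_add_left]
      exact ih (min d e)

-- a row's summary is the denotation on that row's food cells
lemma pv_row (px py x : Int) (cols : List Int) :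
    cff_row_summary px py x cols = pvG px py (pvCellsRow x cols 0) := by
  have hlen := pv_filter_len cols 0
  simp only [cff_row_summary, pvCellsRow, pvG, PySem.List.count_eq]
  rcases hfl : (PySem.List.enumerate cols 0).filter (fun q => q.2 == 1) with _ | ⟨q, t⟩ <;>
    rw [hfl] at hlen
  · rw [hfl]
    simp [← hlen]
  · rw [hfl]
    have hn : ¬ ((List.count 1 cols : Int) = 0) := by
      simp only [List.length_cons] at hlen
      omega
    rw [if_neg hn]
    simp only [List.map_cons, PySem.List.min?_id_cons, List.map_map, List.length_cons,
      List.foldl_cons]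
    refine Prod.ext ?_ ?_
    · simp only [List.length_cons, List.length_map] at hlen ⊢
      push_cast
      omega
    · rw [show pvMMin none ((fun cxy : Int × Int => |px - cxy.1| + |py - cxy.2|)
            ((fun q : Int × Int => (x, q.1)) q)) = some (|px - x| + |py - q.1|) from rfl,
        pv_mmin_some]
      have hmap : t.map ((fun cxy : Int × Int => |px - cxy.1| + |py - cxy.2|) ∘
            fun q : Int × Int => (x, q.1))
          = (t.map fun q : Int × Int => |py - q.1|).map (fun e => |px - x| + e) := by
        simp [Function.comp]
      rw [hmap, pv_min_add]

-- the recursive merge over rows computes the denotation on all cells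
lemma pv_go (px py : Int) : ∀ (fg : List (List Int)) (s : Int),
    cff_go px py s fg = pvG px py (pvCells fg s) := by
  intro fg
  induction fg with
  | nil => intro s; simp [cff_go, pvCells, PySem.List.enumerate, pvG]
  | cons cols rest ih =>
      intro s
      simp only [cff_go, pvCells, PySem.List.enumerate_cons, List.flatMap_cons]
      rw [pv_row, ih, ← pv_g_append]
      rfl

-- ===== VERDICT (by name: the statement is the Claim_ definition above) =====
theorem calculate_food_features_spec : Claim_equal_calculate_food_features := by
  intro row px py _ _
  show _ = _
  unfold calculate_food_features calculate_food_features_alt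
  simp only []
  rw [show (fun (st : Int × Option Int) (x : Int) =>
        let cols := PySem.List.pyGetD (((PySem.Dict.mk row).get? "food_grid").getD []) x []
        (PySem.List.pyRange 0 (PySem.List.len cols) 1).foldl (fun st y =>
          if PySem.List.pyGetD cols y 0 = 1 then
            let dist := |px - x| + |py - y|
            match st.2 with
            | none => (st.1 + 1, some dist)
            | some m => (st.1 + 1, if dist < m then some dist else some m)
          else st) st)
      = (fun (st : Int × Option Int) (x : Int) =>
        let cols := PySem.List.pyGetD (((PySem.Dict.mk row).get? "food_grid").getD []) x []
        (PySem.List.pyRange 0 (PySem.List.len cols) 1).foldl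
          (fun st y => if PySem.List.pyGetD cols y 0 = 1 then pvStep px py st (x, y) else st) st)
      from by funext st x; simp only [pvStep]]
  rw [pv_outer_range, pv_outer, pv_split, pv_go]
  simp [pvG]
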